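-- pv_equiv track=rewrite | github.com/ntomsic/algorithms | algorithms/matrix/matrix_inversion.py | array_is_matrix
-- ===== SOURCE A (Python) =====
-- def array_is_matrix(_m):
--     if len(_m) == 0:
--         return False
--     first_col = len(_m[0])
--     for row in _m:
--         if len(row) != first_col:
--             return False
--     return True
-- ===== SOURCE B (Python) =====
-- def array_is_matrix(_m):
--     return len({len(row) for row in _m}) == 1
-- ===== Notes on version B (the rewrite author's own statement) =====
-- stated objective: idiomatic
-- what changed: Replaces the compare-each-row-to-the-first-length loop with early exit by collecting the set of distinct row lengths and testing that its cardinality is 1 (empty input gives cardinality 0).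
import Mathlib
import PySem

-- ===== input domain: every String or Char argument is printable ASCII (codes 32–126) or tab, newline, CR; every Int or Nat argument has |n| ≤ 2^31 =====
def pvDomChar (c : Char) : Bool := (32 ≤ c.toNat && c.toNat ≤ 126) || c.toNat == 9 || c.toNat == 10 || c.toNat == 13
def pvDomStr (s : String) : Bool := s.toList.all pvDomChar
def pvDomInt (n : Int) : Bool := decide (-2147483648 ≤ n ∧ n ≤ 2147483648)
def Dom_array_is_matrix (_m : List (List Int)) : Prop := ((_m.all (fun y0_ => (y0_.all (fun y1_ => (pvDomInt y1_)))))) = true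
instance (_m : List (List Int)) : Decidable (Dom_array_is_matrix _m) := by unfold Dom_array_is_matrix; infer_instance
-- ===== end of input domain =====

-- B replaces A's compare-to-first-length loop (with early exit) by collecting the set of
-- distinct row lengths and testing that its cardinality is exactly 1 (idiomatic; same O(n) cost).


-- ===== PORT A =====
-- the 'for row in _m' loop with its early 'return False'
def arrayIsMatrixLoopA (rows : List (List Int)) (first_col : Nat) : Bool :=
  match rows with
  | [] => true
  | row :: rest => if row.length ≠ first_col then false else arrayIsMatrixLoopA rest first_col

def array_is_matrix (_m : List (List Int)) : Bool :=
  if _m.length = 0 then false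
  else
    let first_col := (_m.headD []).length   -- len(_m[0]); _m is nonempty here
    arrayIsMatrixLoopA _m first_col

-- ===== PORT B =====
-- len({len(row) for row in _m}) == 1
def array_is_matrix_alt (_m : List (List Int)) : Bool :=
  PySem.Set.len (PySem.Set.ofList (_m.map (fun row => row.length))) == 1

-- ===== PRECONDITION & SPEC =====
def Spec_array_is_matrix (_m : List (List Int)) (out : Bool) : Prop := out = array_is_matrix_alt _m
instance (_m : List (List Int)) (out : Bool) : Decidable (Spec_array_is_matrix _m out) := by unfold Spec_array_is_matrix; infer_instance

-- ===== CLAIM (what is proved, stated in full; the proofs are below) =====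
def Claim_equal_array_is_matrix : Prop := ∀ (_m : List (List Int)), Dom_array_is_matrix _m → Spec_array_is_matrix _m (array_is_matrix _m)

-- ===== LEMMAS AND PROOFS =====

theorem loopA_eq_all (rs : List (List Int)) (fc : Nat) :
    arrayIsMatrixLoopA rs fc = rs.all (fun r => r.length == fc) := by
  induction rs with
  | nil => rfl
  | cons r rest ih =>
    simp only [arrayIsMatrixLoopA, List.all_cons, ih]
    by_cases h : r.length = fc <;> simp [h]

theorem le_length_foldl_add (l : List Nat) (s : List Nat) :
    s.length ≤ (l.foldl PySem.Set.add s).length := by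
  induction l generalizing s with
  | nil => simp
  | cons x xs ih =>
    refine le_trans ?_ (ih (PySem.Set.add s x))
    simp only [PySem.Set.add]
    split <;> simp

theorem foldl_add_singleton (l : List Nat) (a : Nat) :
    ((l.foldl PySem.Set.add [a]).length == 1) = l.all (fun x => x == a) := by
  induction l with
  | nil => rfl
  | cons x xs ih =>
    simp only [List.foldl_cons, List.all_cons]
    by_cases h : x = a
    · have : PySem.Set.add [a] x = [a] := by
        simp [PySem.Set.add, PySem.Set.contains, h]
      rw [this, ih]
      simp [h]
    · have hadd : PySem.Set.add [a] x = [a, x] := by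
        simp [PySem.Set.add, PySem.Set.contains, h]
      rw [hadd]
      have h2 : 2 ≤ (xs.foldl PySem.Set.add [a, x]).length :=
        le_length_foldl_add xs [a, x]
      have : ((xs.foldl PySem.Set.add [a, x]).length == 1) = false := by
        simp only [beq_eq_false_iff_ne]; omega
      simp [this, h]

-- ===== VERDICT (by name: the statement is the Claim_ definition above) =====
theorem array_is_matrix_spec : Claim_equal_array_is_matrix := by
  intro _m _
  unfold Spec_array_is_matrix array_is_matrix array_is_matrix_alt
  cases _m with
  | nil => rfl
  | cons r rs =>
    have hcast : ∀ n : Nat, ((n : Int) == 1) = (n == 1) := by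
      intro n; simp
    simp only [PySem.Set.len, PySem.Set.ofList_eq_foldl, List.map_cons, List.foldl_cons]
    have hB : PySem.Set.add ([] : List Nat) r.length = [r.length] := by
      simp [PySem.Set.add, PySem.Set.contains]
    rw [hB, hcast, foldl_add_singleton]
    simp only [List.length_cons, List.headD_cons]
    rw [if_neg (by simp), loopA_eq_all]
    simp [List.all_map, List.all_cons, Function.comp_def]
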